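-- pv_equiv track=rewrite | github.com/janohhank/Programming-exercises-python | solutions/012-BusDrivers.py | getBestTravelTime
-- ===== SOURCE A (Python) =====
-- def getBestTravelTime(travelTimesMap):
-- 	bestTravelTimes = {}
-- 	minTravelTime = float('inf')
-- 	for busDriverID, travelTimes in travelTimesMap.items():
-- 		travelTimes.sort()
-- 		currentMin = travelTimes[0]
-- 		if(currentMin < minTravelTime):
-- 			minTravelTime = currentMin
-- 			bestTravelTimes.clear()
-- 			bestTravelTimes[busDriverID] = minTravelTime
-- 		elif(currentMin == minTravelTime):
-- 			bestTravelTimes[busDriverID] = minTravelTime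
-- 	return bestTravelTimes
-- ===== SOURCE B (Python) =====
-- def getBestTravelTime(travelTimesMap):
--     minPerDriver = {busDriverID: min(travelTimes) for busDriverID, travelTimes in travelTimesMap.items()}
--     best = min(minPerDriver.values(), default=None)
--     return {busDriverID: t for busDriverID, t in minPerDriver.items() if t == best}
-- ===== Notes on version B (the rewrite author's own statement) =====
-- stated objective: simpler
-- what changed: A interleaves a running global minimum with clearing/refilling the result dict while sorting each list in place; B is a build-table-then-filter decomposition: it builds a per-driver minimum table with min() (no sorting), takes the global minimum of that table, and returns a filtering comprehension over it (B does not mutate the argument lists, unlike A which sorts them in place).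
import Mathlib
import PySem

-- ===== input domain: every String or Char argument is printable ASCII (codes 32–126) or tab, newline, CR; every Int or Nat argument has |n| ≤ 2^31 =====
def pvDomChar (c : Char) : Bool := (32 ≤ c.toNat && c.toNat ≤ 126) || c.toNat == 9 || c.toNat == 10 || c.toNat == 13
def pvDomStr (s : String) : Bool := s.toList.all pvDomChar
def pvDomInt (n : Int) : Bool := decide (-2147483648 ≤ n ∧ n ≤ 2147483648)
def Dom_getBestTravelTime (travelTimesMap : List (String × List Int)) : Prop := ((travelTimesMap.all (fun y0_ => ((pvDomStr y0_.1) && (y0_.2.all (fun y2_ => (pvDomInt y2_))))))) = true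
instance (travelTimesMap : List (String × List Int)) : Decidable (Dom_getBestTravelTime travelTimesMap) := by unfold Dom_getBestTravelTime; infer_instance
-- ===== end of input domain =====

-- B replaces A's interleaved track-and-clear loop by build-a-minimum-table-then-filter (B does not
-- sort the argument lists in place as A does; the equivalence proved is about the return value).

-- ===== PORT A =====
-- One iteration of A's loop body; state = (bestTravelTimes, minTravelTime), none = float('inf').
def getBestTravelTimeStep (st : PySem.Dict String Int × Option Int) (p : String × List Int) :
    PySem.Dict String Int × Option Int :=
  let sortedTimes := PySem.List.sorted p.2 (fun x => x) false   -- travelTimes.sort()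
  let currentMin := PySem.List.pyGetD sortedTimes 0 0           -- travelTimes[0]; IndexError on [] excluded by Pre_
  match st.2 with
  | none =>                                                     -- currentMin < inf always
      (PySem.Dict.insert PySem.Dict.empty p.1 currentMin, some currentMin)
  | some mn =>
      if currentMin < mn then
        (PySem.Dict.insert PySem.Dict.empty p.1 currentMin, some currentMin)
      else if currentMin = mn then
        (st.1.insert p.1 mn, st.2)
      else st

def getBestTravelTime (travelTimesMap : List (String × List Int)) : List (String × Int) :=
  (travelTimesMap.foldl getBestTravelTimeStep (PySem.Dict.empty, none)).1.items

-- ===== PORT B =====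
def getBestTravelTime_alt (travelTimesMap : List (String × List Int)) : List (String × Int) :=
  -- min(travelTimes); ValueError on an empty list excluded by Pre_ (the .getD default is never read there)
  let minPerDriver : PySem.Dict String Int :=
    travelTimesMap.foldl
      (fun d p => d.insert p.1 ((PySem.List.min? p.2 (fun x => x)).getD 0)) PySem.Dict.empty
  let best : Option Int := PySem.List.min? minPerDriver.values (fun x => x)  -- min(…, default=None)
  (minPerDriver.items.foldl
      (fun d p => if some p.2 = best then d.insert p.1 p.2 else d) PySem.Dict.empty).items

-- ===== PRECONDITION & SPEC =====
-- Pre_ excludes (a) pairs with an empty travel-time list, where A raises IndexError (and B ValueError),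
-- and (b) duplicate driver ids, which cannot occur in the Python dict this association list represents.
def Pre_getBestTravelTime (travelTimesMap : List (String × List Int)) : Prop :=
  (travelTimesMap.map Prod.fst).Nodup ∧ ∀ p ∈ travelTimesMap, p.2 ≠ []
instance (travelTimesMap : List (String × List Int)) : Decidable (Pre_getBestTravelTime travelTimesMap) := by
  unfold Pre_getBestTravelTime; infer_instance

def pvWitness_getBestTravelTime : (List (String × List Int)) :=
  [("alice", [3, 1, 2]), ("bob", [1, 5]), ("carl", [4])]

def Spec_getBestTravelTime (travelTimesMap : List (String × List Int)) (out : List (String × Int)) : Prop :=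
  out = getBestTravelTime_alt travelTimesMap
instance (travelTimesMap : List (String × List Int)) (out : List (String × Int)) : Decidable (Spec_getBestTravelTime travelTimesMap out) := by
  unfold Spec_getBestTravelTime; infer_instance

-- ===== CLAIM (what is proved, stated in full; the proofs are below) =====
def Claim_equal_getBestTravelTime : Prop := ∀ (travelTimesMap : List (String × List Int)), Dom_getBestTravelTime travelTimesMap → Pre_getBestTravelTime travelTimesMap → Spec_getBestTravelTime travelTimesMap (getBestTravelTime travelTimesMap)

-- ===== LEMMAS AND PROOFS =====

-- the per-driver minimum table, the global minimum, and the keep-condition, as pure lists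
def minsOf (l : List (String × List Int)) : List (String × Int) :=
  l.map (fun p => (p.1, (PySem.List.min? p.2 (fun x => x)).getD 0))

def gmin (l : List (String × List Int)) : Option Int :=
  PySem.List.min? ((minsOf l).map Prod.snd) (fun x => x)

def keep (o : Option Int) (q : String × Int) : Bool := decide (some q.2 = o)

lemma head_sorted_eq_min (ts : List Int) (h : ts ≠ []) :
    PySem.List.pyGetD (PySem.List.sorted ts (fun x => x) false) 0 0
      = (PySem.List.min? ts (fun x => x)).getD 0 := by
  obtain ⟨m, hm⟩ : ∃ m, PySem.List.min? ts (fun x => x) = some m := by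
    cases hmm : PySem.List.min? ts (fun x => x) with
    | none => exact absurd ((PySem.List.min?_eq_none_iff ts _).mp hmm) h
    | some m => exact ⟨m, rfl⟩
  cases hs : PySem.List.sorted ts (fun x => x) false with
  | nil => exact absurd ((PySem.List.sorted_eq_nil_iff ts _ _).mp hs) h
  | cons c rest =>
    have hcmem : c ∈ ts := by
      have : c ∈ PySem.List.sorted ts (fun x => x) false := by simp [hs]
      exact (PySem.List.mem_sorted ts _ _ c).mp this
    have h1 : c ≤ m := PySem.List.key_head_sorted_le ts _ hs m (PySem.List.min?_mem hm)
    have h2 : m ≤ c := PySem.List.min?_isMin hm c hcmem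
    simp [hm, PySem.List.pyGetD_zero_cons, le_antisymm h1 h2]

lemma min?_id_append_singleton (xs : List Int) (c : Int) :
    PySem.List.min? (xs ++ [c]) (fun x => x)
      = some (match PySem.List.min? xs (fun x => x) with | none => c | some g => min g c) := by
  cases xs with
  | nil =>
    rw [show (PySem.List.min? ([] : List Int) (fun x => x)) = none from
      (PySem.List.min?_eq_none_iff _ _).mpr rfl]
    simp [PySem.List.min?_id_cons]
  | cons x t =>
    rw [List.cons_append, PySem.List.min?_id_cons, PySem.List.min?_id_cons]
    simp [List.foldl_append]

-- the filtering dict-comprehension appends exactly the kept pairs (fresh, distinct keys)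
lemma items_foldl_if_insert (c : String × Int → Bool)
    (l : List (String × Int)) (d : PySem.Dict String Int)
    (hd : ∀ p ∈ l, d.contains p.1 = false) (hnd : (l.map Prod.fst).Nodup) :
    (l.foldl (fun acc p => if c p then acc.insert p.1 p.2 else acc) d).items
      = d.items ++ l.filter c := by
  induction l generalizing d with
  | nil => simp
  | cons p t ih =>
    simp only [List.map_cons, List.nodup_cons] at hnd
    by_cases hp : c p
    · have hcd : d.contains p.1 = false := hd p (by simp)
      have hstep : ∀ q ∈ t, (d.insert p.1 p.2).contains q.1 = false := by
        intro q hq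
        rw [PySem.Dict.contains_insert]
        have : q.1 ≠ p.1 := by
          intro he; exact hnd.1 (he ▸ List.mem_map_of_mem hq)
        simp [this, hd q (by simp [hq])]
      have := ih (d.insert p.1 p.2) hstep hnd.2
      simp [hp, this, PySem.Dict.items_insert_of_not_contains d p.2 hcd]
    · have := ih d (fun q hq => hd q (by simp [hq])) hnd.2
      simp [hp, this]

lemma gmin_le (l : List (String × List Int)) (g : Int) (hg : gmin l = some g) :
    ∀ q ∈ minsOf l, g ≤ q.2 := by
  intro q hq
  exact PySem.List.min?_isMin hg q.2 (List.mem_map_of_mem hq)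

lemma map_fst_minsOf (l : List (String × List Int)) :
    (minsOf l).map Prod.fst = l.map Prod.fst := by
  simp [minsOf]

lemma mk_filter_insert_fresh (l : List (String × List Int)) (c : String × Int → Bool)
    (k : String) (v : Int) (hk : k ∉ l.map Prod.fst) :
    (PySem.Dict.mk ((minsOf l).filter c)).insert k v
      = PySem.Dict.mk ((minsOf l).filter c ++ [(k, v)]) := by
  have hnotc : (PySem.Dict.mk ((minsOf l).filter c)).contains k = false := by
    rw [PySem.Dict.contains_eq_decide_mem_keys]
    simp only [decide_eq_false_iff_not, PySem.Dict.keys_mk]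
    intro hmem
    apply hk
    rw [← map_fst_minsOf]
    rcases List.mem_map.mp hmem with ⟨q, hq, hqe⟩
    exact hqe ▸ List.mem_map_of_mem (List.mem_of_mem_filter hq)
  apply PySem.Dict.ext
  rw [PySem.Dict.items_insert_of_not_contains _ v hnotc]

lemma step_none (d : PySem.Dict String Int) (p : String × List Int) :
    getBestTravelTimeStep (d, none) p
      = (PySem.Dict.insert PySem.Dict.empty p.1
           (PySem.List.pyGetD (PySem.List.sorted p.2 (fun x => x) false) 0 0),
         some (PySem.List.pyGetD (PySem.List.sorted p.2 (fun x => x) false) 0 0)) := rfl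

lemma step_some (d : PySem.Dict String Int) (g : Int) (p : String × List Int) :
    getBestTravelTimeStep (d, some g) p
      = (if PySem.List.pyGetD (PySem.List.sorted p.2 (fun x => x) false) 0 0 < g then
           (PySem.Dict.insert PySem.Dict.empty p.1
              (PySem.List.pyGetD (PySem.List.sorted p.2 (fun x => x) false) 0 0),
            some (PySem.List.pyGetD (PySem.List.sorted p.2 (fun x => x) false) 0 0))
         else if PySem.List.pyGetD (PySem.List.sorted p.2 (fun x => x) false) 0 0 = g then
           (d.insert p.1 g, some g)
         else (d, some g)) := rfl

-- A's loop invariant: the state is (the kept pairs so far as a dict, the running minimum)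
lemma A_fold_eq (l : List (String × List Int))
    (hne : ∀ p ∈ l, p.2 ≠ []) (hnd : (l.map Prod.fst).Nodup) :
    l.foldl getBestTravelTimeStep (PySem.Dict.empty, none)
      = (PySem.Dict.mk ((minsOf l).filter (keep (gmin l))), gmin l) := by
  induction l using List.reverseRecOn with
  | nil =>
    rw [show gmin [] = none from (PySem.List.min?_eq_none_iff _ _).mpr rfl]
    rfl
  | append_singleton xs p ih =>
    have hne' : ∀ q ∈ xs, q.2 ≠ [] := fun q hq => hne q (by simp [hq])
    have hmapnd : (xs.map Prod.fst ++ [p.1]).Nodup := by simpa using hnd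
    have hnd' : (xs.map Prod.fst).Nodup := (List.nodup_append.mp hmapnd).1
    have hfresh : p.1 ∉ xs.map Prod.fst := by
      intro hmem
      rcases List.mem_map.mp hmem with ⟨q, hq, he⟩
      have hmapnd' := hmapnd
      simp [List.nodup_append] at hmapnd'
      exact hmapnd'.2 q.1 q.2 (by simpa using hq) he
    have hpne : p.2 ≠ [] := hne p (by simp)
    have hcv : PySem.List.pyGetD (PySem.List.sorted p.2 (fun x => x) false) 0 0
        = (PySem.List.min? p.2 (fun x => x)).getD 0 := head_sorted_eq_min p.2 hpne
    set cv : Int := (PySem.List.min? p.2 (fun x => x)).getD 0 with hcvdef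
    have hmins : minsOf (xs ++ [p]) = minsOf xs ++ [(p.1, cv)] := by
      simp [minsOf, hcvdef]
    have hgm : gmin (xs ++ [p])
        = some (match gmin xs with | none => cv | some g => min g cv) := by
      rw [gmin, hmins]
      simp only [List.map_append, List.map_cons, List.map_nil]
      exact min?_id_append_singleton _ _
    rw [List.foldl_append, List.foldl_cons, List.foldl_nil, ih hne' hnd']
    cases hg : gmin xs with
    | none =>
      have hxs : xs = [] := by
        have h0 := (PySem.List.min?_eq_none_iff ((minsOf xs).map Prod.snd) (fun x => x)).mp hg
        have h1 : minsOf xs = [] := by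
          cases hx : minsOf xs with
          | nil => rfl
          | cons a t => rw [hx] at h0; simp at h0
        simpa [minsOf] using h1
      subst hxs
      rw [step_none, hcv]
      rw [show gmin ([] ++ [p]) = some cv from by rw [hgm, hg]]
      rw [show minsOf ([] ++ [p]) = [(p.1, cv)] from by simpa using hmins]
      rw [show List.filter (keep (some cv)) [(p.1, cv)] = [(p.1, cv)] from by simp [keep]]
      refine Prod.ext_iff.mpr ⟨?_, rfl⟩
      apply PySem.Dict.ext
      rw [PySem.Dict.items_insert_of_not_contains _ cv (PySem.Dict.contains_empty _)]
      rfl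
    | some g =>
      rw [step_some, hcv]
      by_cases hlt : cv < g
      · have hgm' : gmin (xs ++ [p]) = some cv := by
          rw [hgm, hg]; simp [min_eq_right (le_of_lt hlt)]
        have hfilt : (minsOf xs).filter (keep (some cv)) = [] := by
          rw [List.filter_eq_nil_iff]
          intro q hq hqd
          simp only [keep, decide_eq_true_eq, Option.some.injEq] at hqd
          exact absurd (hqd ▸ gmin_le xs g hg q hq) (not_le.mpr hlt)
        rw [if_pos hlt, hgm', hmins, List.filter_append, hfilt, List.nil_append]
        rw [show List.filter (keep (some cv)) [(p.1, cv)] = [(p.1, cv)] from by simp [keep]]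
        refine Prod.ext_iff.mpr ⟨?_, rfl⟩
        apply PySem.Dict.ext
        rw [PySem.Dict.items_insert_of_not_contains _ cv (PySem.Dict.contains_empty _)]
        rfl
      · by_cases heq : cv = g
        · have hgm' : gmin (xs ++ [p]) = some g := by rw [hgm, hg]; simp [heq]
          rw [if_neg hlt, if_pos heq, hgm', hmins, List.filter_append]
          rw [show List.filter (keep (some g)) [(p.1, cv)] = [(p.1, g)] from by
            simp [keep, heq]]
          refine Prod.ext_iff.mpr ⟨?_, rfl⟩
          rw [mk_filter_insert_fresh xs (keep (some g)) p.1 g hfresh]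
        · have hgt : g < cv := lt_of_le_of_ne (not_lt.mp hlt) (Ne.symm heq)
          have hgm' : gmin (xs ++ [p]) = some g := by
            rw [hgm, hg]; simp [min_eq_left (le_of_lt hgt)]
          rw [if_neg hlt, if_neg heq, hgm', hmins, List.filter_append]
          rw [show List.filter (keep (some g)) [(p.1, cv)] = [] from by simp [keep, heq]]
          simp

lemma B_eq (m : List (String × List Int)) (hnd : (m.map Prod.fst).Nodup) :
    getBestTravelTime_alt m = (minsOf m).filter (keep (gmin m)) := by
  rw [getBestTravelTime_alt]
  have hitems : (m.foldl
      (fun d p => d.insert p.1 ((PySem.List.min? p.2 (fun x => x)).getD 0))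
      PySem.Dict.empty).items = minsOf m := by
    have := PySem.Dict.items_foldl_insert_fresh (l := m) (k := Prod.fst)
      (v := fun p => (PySem.List.min? p.2 (fun x => x)).getD 0) (d := PySem.Dict.empty)
      (fun a _ => PySem.Dict.contains_empty _) hnd
    simpa [minsOf] using this
  have hvals : (m.foldl
      (fun d p => d.insert p.1 ((PySem.List.min? p.2 (fun x => x)).getD 0))
      PySem.Dict.empty).values = (minsOf m).map Prod.snd := by
    simp only [PySem.Dict.values, hitems]
  simp only [hitems, hvals]
  rw [show (PySem.List.min? ((minsOf m).map Prod.snd) (fun x => x)) = gmin m from rfl]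
  rw [show (fun (d : PySem.Dict String Int) (p : String × Int) =>
        if some p.2 = gmin m then d.insert p.1 p.2 else d)
      = (fun d p => if keep (gmin m) p then d.insert p.1 p.2 else d) from by
    funext d p; simp [keep]]
  rw [items_foldl_if_insert (keep (gmin m)) (minsOf m) PySem.Dict.empty
    (fun p _ => PySem.Dict.contains_empty _)
    (by rw [map_fst_minsOf]; exact hnd)]
  rfl

-- ===== VERDICT (by name: the statement is the Claim_ definition above) =====
theorem getBestTravelTime_spec : Claim_equal_getBestTravelTime := by
  intro m _ hpre
  obtain ⟨hnd, hne⟩ := hpre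
  show getBestTravelTime m = getBestTravelTime_alt m
  rw [getBestTravelTime, A_fold_eq m hne hnd, B_eq m hnd]
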